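-- pv_equiv track=rewrite | github.com/sonudhakane7526/coding-questions | digit sum difference.py | digit_sum_difference
-- ===== SOURCE A (Python) =====
-- def digit_sum_difference(m, n):
--     sum_divisible_by_4 = 0
--     sum_divisible_by_7 = 0
--
--     for i in range(m, n + 1):
--         if i % 4 == 0:
--             num = i
--             while num > 0:
--                 sum_divisible_by_4 += num % 10
--                 num //= 10
--         elif i % 7 == 0:
--             num = i
--             while num > 0:
--                 sum_divisible_by_7 += num % 10
--                 num //= 10
--
--     return abs(sum_divisible_by_4 - sum_divisible_by_7)
-- ===== SOURCE B (Python) =====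
-- def digit_sum_difference(m, n):
--     def ds(x):
--         s = 0
--         while x > 0:
--             s += x % 10
--             x //= 10
--         return s
--     start4 = m + (-m) % 4
--     s4 = sum(ds(i) for i in range(start4, n + 1, 4))
--     start7 = m + (-m) % 7
--     s7 = sum(ds(i) for i in range(start7, n + 1, 7) if i % 4 != 0)
--     return abs(s4 - s7)
-- ===== Notes on version B (the rewrite author's own statement) =====
-- stated objective: alternative
-- what changed: Instead of scanning every integer in [m,n] and testing divisibility, B iterates only over the arithmetic progressions of multiples of 4 and of 7 (strided ranges starting at the first multiple >= m), summing digit sums with a helper and excluding multiples of 4 from the 7-sum.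
import Mathlib
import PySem

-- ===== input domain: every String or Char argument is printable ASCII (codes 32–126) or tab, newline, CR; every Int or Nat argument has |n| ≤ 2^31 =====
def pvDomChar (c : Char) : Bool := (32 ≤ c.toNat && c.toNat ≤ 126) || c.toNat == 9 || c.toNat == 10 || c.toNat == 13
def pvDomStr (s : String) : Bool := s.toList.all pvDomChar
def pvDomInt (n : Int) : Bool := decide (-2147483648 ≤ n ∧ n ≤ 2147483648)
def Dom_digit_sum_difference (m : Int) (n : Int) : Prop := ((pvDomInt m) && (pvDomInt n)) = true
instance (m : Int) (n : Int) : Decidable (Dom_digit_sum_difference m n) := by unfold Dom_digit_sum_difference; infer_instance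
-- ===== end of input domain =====

-- B iterates only the strided ranges of multiples of 4 and of 7 instead of scanning every
-- integer in [m,n] and testing divisibility; same return value on all inputs.

-- ===== PORT A =====
-- the 'while num > 0' digit-sum accumulation loop of A (num, running sum); the Nat fuel
-- 'num.toNat' only bounds the iteration count (num shrinks by at least 1 per step), the
-- loop still stops exactly when num ≤ 0, as Python's does
def pvDsLoopA (fuel : Nat) (num : Int) (acc : Int) : Int :=
  match fuel with
  | 0 => acc
  | Nat.succ f => if 0 < num then pvDsLoopA f (PySem.Int.floordiv num 10) (acc + PySem.Int.mod num 10) else acc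

def digit_sum_difference (m : Int) (n : Int) : Int :=
  let st := (PySem.List.pyRange m (n + 1) 1).foldl
    (fun (p : Int × Int) i =>
      if PySem.Int.mod i 4 = 0 then (pvDsLoopA i.toNat i p.1, p.2)
      else if PySem.Int.mod i 7 = 0 then (p.1, pvDsLoopA i.toNat i p.2)
      else p) (0, 0)
  |st.1 - st.2|

-- ===== PORT B =====
-- B's helper ds(x): 'while x > 0' digit-sum loop, same fuel bound as A's
def pvDsLoopB (fuel : Nat) (x : Int) (s : Int) : Int :=
  match fuel with
  | 0 => s
  | Nat.succ f => if 0 < x then pvDsLoopB f (PySem.Int.floordiv x 10) (s + PySem.Int.mod x 10) else s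

def pvDsB (x : Int) : Int := pvDsLoopB x.toNat x 0

def digit_sum_difference_alt (m : Int) (n : Int) : Int :=
  let start4 := m + PySem.Int.mod (-m) 4
  let s4 := ((PySem.List.pyRange start4 (n + 1) 4).map pvDsB).sum
  let start7 := m + PySem.Int.mod (-m) 7
  let s7 := (((PySem.List.pyRange start7 (n + 1) 7).filter (fun i => PySem.Int.mod i 4 != 0)).map pvDsB).sum
  |s4 - s7|

-- ===== PRECONDITION & SPEC =====
def Spec_digit_sum_difference (m : Int) (n : Int) (out : Int) : Prop := out = digit_sum_difference_alt m n
instance (m : Int) (n : Int) (out : Int) : Decidable (Spec_digit_sum_difference m n out) := by unfold Spec_digit_sum_difference; infer_instance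

-- ===== CLAIM (what is proved, stated in full; the proofs are below) =====
def Claim_equal_digit_sum_difference : Prop := ∀ (m : Int) (n : Int), Dom_digit_sum_difference m n → Spec_digit_sum_difference m n (digit_sum_difference m n)

-- ===== LEMMAS AND PROOFS =====

-- the accumulator of the digit-sum loop is additive
theorem pvDsLoopA_acc (fuel : Nat) : ∀ (num acc : Int),
    pvDsLoopA fuel num acc = acc + pvDsLoopA fuel num 0 := by
  induction fuel with
  | zero => intro num acc; simp [pvDsLoopA]
  | succ f ih =>
      intro num acc
      simp only [pvDsLoopA]
      by_cases hp : 0 < num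
      · rw [if_pos hp, if_pos hp, ih _ (acc + PySem.Int.mod num 10),
            ih _ (0 + PySem.Int.mod num 10)]
        ring
      · rw [if_neg hp, if_neg hp]
        ring

-- the two digit-sum loops agree
theorem pvDsLoop_eq (fuel : Nat) : ∀ (x s : Int), pvDsLoopB fuel x s = pvDsLoopA fuel x s := by
  induction fuel with
  | zero => intro x s; rfl
  | succ f ih =>
      intro x s
      simp only [pvDsLoopA, pvDsLoopB]
      by_cases hp : 0 < x
      · rw [if_pos hp, if_pos hp, ih]
      · rw [if_neg hp, if_neg hp]

theorem pvDsB_eq (x : Int) : pvDsB x = pvDsLoopA x.toNat x 0 := pvDsLoop_eq x.toNat x 0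

-- A's fold over the pair of accumulators computes the two conditional sums
theorem foldA_eq (l : List Int) (s4 s7 : Int) :
    l.foldl (fun (p : Int × Int) i =>
      if PySem.Int.mod i 4 = 0 then (pvDsLoopA i.toNat i p.1, p.2)
      else if PySem.Int.mod i 7 = 0 then (p.1, pvDsLoopA i.toNat i p.2)
      else p) (s4, s7)
    = (s4 + (l.map (fun i => if PySem.Int.mod i 4 = 0 then pvDsLoopA i.toNat i 0 else 0)).sum,
       s7 + (l.map (fun i => if PySem.Int.mod i 4 = 0 then 0
                             else if PySem.Int.mod i 7 = 0 then pvDsLoopA i.toNat i 0 else 0)).sum) := by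
  induction l generalizing s4 s7 with
  | nil => simp
  | cons a l ih =>
      simp only [List.foldl_cons, List.map_cons, List.sum_cons]
      by_cases h4 : PySem.Int.mod a 4 = 0
      · rw [if_pos h4, if_pos h4, if_pos h4, ih, pvDsLoopA_acc]
        simp only [Prod.mk.injEq]
        constructor <;> ring
      · rw [if_neg h4, if_neg h4, if_neg h4]
        by_cases h7 : PySem.Int.mod a 7 = 0
        · rw [if_pos h7, if_pos h7, ih, pvDsLoopA_acc]
          simp only [Prod.mk.injEq]
          constructor <;> ring
        · rw [if_neg h7, if_neg h7, ih]
          simp only [Prod.mk.injEq]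
          constructor <;> ring

-- pyRange with positive step: nil and cons forms
theorem pyRange_pos_eq_nil (a b k : Int) (hk : 0 < k) (h : b ≤ a) :
    PySem.List.pyRange a b k = [] := by
  rw [PySem.List.pyRange_of_pos a b hk, if_neg (by omega)]
  simp

theorem pyRange_pos_cons (a b k : Int) (hk : 0 < k) (h : a < b) :
    PySem.List.pyRange a b k = a :: PySem.List.pyRange (a + k) b k := by
  rw [PySem.List.pyRange_of_pos a b hk, PySem.List.pyRange_of_pos (a + k) b hk, if_pos h]
  by_cases h2 : a + k < b
  · rw [if_pos h2]
    have e1 : (b - a + k - 1) / k = (b - (a + k) + k - 1) / k + 1 := by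
      have e : b - a + k - 1 = (b - (a + k) + k - 1) + 1 * k := by ring
      rw [e, Int.add_mul_ediv_right _ _ (ne_of_gt hk)]
    have hnn : 0 ≤ (b - (a + k) + k - 1) / k := Int.ediv_nonneg (by omega) (by omega)
    have e2 : ((b - a + k - 1) / k).toNat = ((b - (a + k) + k - 1) / k).toNat + 1 := by omega
    rw [e2, List.range_succ_eq_map]
    simp only [List.map_cons, List.map_map]
    refine congrArg₂ List.cons (by simp) ?_
    refine List.map_congr_left ?_
    intro x _
    simp only [Function.comp_apply]
    push_cast
    ring
  · rw [if_neg h2]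
    have h1 : 1 ≤ (b - a + k - 1) / k := by
      rw [Int.le_ediv_iff_mul_le hk]; omega
    have hlt : (b - a + k - 1) / k < 2 := by
      rw [Int.ediv_lt_iff_lt_mul hk]; omega
    have e1 : ((b - a + k - 1) / k).toNat = 1 := by omega
    rw [e1]
    simp

-- the conditional sum over [m,b) equals the plain sum over the strided range of multiples of k
theorem strided_aux (k : Int) (hk : 0 < k) (f : Int → Int) (b : Int) :
    ∀ (d : Nat) (m : Int), (b - m).toNat ≤ d →
    ((PySem.List.pyRange m b 1).map (fun i => if PySem.Int.mod i k = 0 then f i else 0)).sum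
    = ((PySem.List.pyRange (m + PySem.Int.mod (-m) k) b k).map f).sum := by
  intro d
  induction d with
  | zero =>
      intro m h
      have hbm : b ≤ m := by omega
      have hr0 : 0 ≤ PySem.Int.mod (-m) k := by
        rw [PySem.Int.mod_eq_emod_of_pos hk]
        exact Int.emod_nonneg _ (by omega)
      rw [PySem.List.pyRange_one_eq_nil hbm, pyRange_pos_eq_nil _ _ _ hk (by linarith)]
      simp
  | succ d ih =>
      intro m h
      by_cases hmb : b ≤ m
      · have hr0 : 0 ≤ PySem.Int.mod (-m) k := by
          rw [PySem.Int.mod_eq_emod_of_pos hk]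
          exact Int.emod_nonneg _ (by omega)
        rw [PySem.List.pyRange_one_eq_nil hmb, pyRange_pos_eq_nil _ _ _ hk (by linarith)]
        simp
      · have hmlt : m < b := by omega
        rw [PySem.List.pyRange_one_cons hmlt]
        simp only [List.map_cons, List.sum_cons]
        by_cases hm : PySem.Int.mod m k = 0
        · have hdm : k ∣ m := (PySem.Int.mod_eq_zero_iff_dvd m k).mp hm
          obtain ⟨c, hc⟩ := hdm
          have h1 : PySem.Int.mod (-m) k = 0 :=
            (PySem.Int.mod_eq_zero_iff_dvd (-m) k).mpr ⟨-c, by rw [hc]; ring⟩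
          have h2 : PySem.Int.mod (-(m + 1)) k = k - 1 := by
            rw [PySem.Int.mod_eq_emod_of_pos hk]
            have e : -(m + 1) = (k - 1) + k * (-c - 1) := by rw [hc]; ring
            rw [e, Int.add_mul_emod_self_left,
                Int.emod_eq_of_lt (by omega) (by omega)]
          rw [if_pos hm, h1, add_zero]
          rw [pyRange_pos_cons m b k hk hmlt]
          simp only [List.map_cons, List.sum_cons]
          have ih' := ih (m + 1) (by omega)
          have e3 : m + 1 + PySem.Int.mod (-(m + 1)) k = m + k := by rw [h2]; ring
          rw [e3] at ih'
          rw [ih']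
        · have hdm : ¬ k ∣ m := fun hd => hm ((PySem.Int.mod_eq_zero_iff_dvd m k).mpr hd)
          have hr0 : 0 ≤ (-m) % k := Int.emod_nonneg _ (by omega)
          have hr1 : (-m) % k < k := Int.emod_lt_of_pos _ hk
          have hrne : (-m) % k ≠ 0 := by
            intro h0
            exact hdm ((dvd_neg).mp (Int.dvd_of_emod_eq_zero h0))
          have hrpos : 0 < (-m) % k := lt_of_le_of_ne hr0 (Ne.symm hrne)
          have hstart : PySem.Int.mod (-(m + 1)) k = PySem.Int.mod (-m) k - 1 := by
            rw [PySem.Int.mod_eq_emod_of_pos hk, PySem.Int.mod_eq_emod_of_pos hk]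
            have e : -(m + 1) = ((-m) % k - 1) + k * ((-m) / k) := by
              rw [Int.emod_def]; ring
            rw [e, Int.add_mul_emod_self_left,
                Int.emod_eq_of_lt (by linarith) (by linarith)]
          rw [if_neg hm, zero_add]
          have ih' := ih (m + 1) (by omega)
          have e3 : m + 1 + PySem.Int.mod (-(m + 1)) k = m + PySem.Int.mod (-m) k := by
            rw [hstart]; ring
          rw [e3] at ih'
          rw [ih']

theorem strided (k : Int) (hk : 0 < k) (f : Int → Int) (m b : Int) :
    ((PySem.List.pyRange m b 1).map (fun i => if PySem.Int.mod i k = 0 then f i else 0)).sum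
    = ((PySem.List.pyRange (m + PySem.Int.mod (-m) k) b k).map f).sum :=
  strided_aux k hk f b (b - m).toNat m (le_refl _)

-- filtered map-sum equals conditional map-sum
theorem sum_map_filter4 (l : List Int) (f : Int → Int) :
    ((l.filter (fun i => PySem.Int.mod i 4 != 0)).map f).sum
    = (l.map (fun i => if PySem.Int.mod i 4 = 0 then 0 else f i)).sum := by
  induction l with
  | nil => simp
  | cons a l ih =>
      rw [List.filter_cons]
      by_cases h : PySem.Int.mod a 4 = 0
      · have hb : (PySem.Int.mod a 4 != 0) = false := by rw [bne_eq_false_iff_eq]; exact h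
        rw [hb]
        simp only [Bool.false_eq_true, if_false, List.map_cons, List.sum_cons, if_pos h, ih]
        ring
      · have hb : (PySem.Int.mod a 4 != 0) = true := by rw [bne_iff_ne]; exact h
        rw [hb]
        simp only [if_true, List.map_cons, List.sum_cons, if_neg h, ih]

-- ===== VERDICT (by name: the statement is the Claim_ definition above) =====
theorem digit_sum_difference_spec : Claim_equal_digit_sum_difference := by
  intro m n _
  unfold Spec_digit_sum_difference digit_sum_difference digit_sum_difference_alt
  simp only [foldA_eq, sum_map_filter4, zero_add]
  have hf : ∀ l : List Int, l.map pvDsB = l.map (fun i => pvDsLoopA i.toNat i 0) :=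
    fun l => List.map_congr_left (fun x _ => pvDsB_eq x)
  have hg : ∀ l : List Int,
      l.map (fun i => if PySem.Int.mod i 4 = 0 then 0 else pvDsB i)
      = l.map (fun i => if PySem.Int.mod i 4 = 0 then 0 else pvDsLoopA i.toNat i 0) :=
    fun l => List.map_congr_left (fun x _ => by rw [pvDsB_eq])
  rw [hf, hg]
  have reorder :
      (List.map (fun i => if PySem.Int.mod i 4 = 0 then 0
                          else if PySem.Int.mod i 7 = 0 then pvDsLoopA i.toNat i 0 else 0)
        (PySem.List.pyRange m (n + 1) 1)).sum
      = (List.map (fun i => if PySem.Int.mod i 7 = 0 then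
                              (if PySem.Int.mod i 4 = 0 then 0 else pvDsLoopA i.toNat i 0) else 0)
        (PySem.List.pyRange m (n + 1) 1)).sum := by
    refine congrArg List.sum (List.map_congr_left ?_)
    intro x _
    by_cases h4 : PySem.Int.mod x 4 = 0 <;> by_cases h7 : PySem.Int.mod x 7 = 0 <;>
      rw [PySem.Int.mod_eq_zero_iff_dvd] at h4 h7 <;> simp [h4, h7]
  rw [reorder]
  rw [strided 4 (by norm_num) (fun i => pvDsLoopA i.toNat i 0) m (n + 1)]
  rw [strided 7 (by norm_num) (fun i => if PySem.Int.mod i 4 = 0 then 0 else pvDsLoopA i.toNat i 0) m (n + 1)]
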